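-- pv_equiv track=rewrite | github.com/rctillquist20/random-geometric-graphs | solve.py | get_isolated_vertices
-- ===== SOURCE A (Python) =====
-- def get_isolated_vertices(matrix):
--     isolated_vertices = []
--     num_cols = len(matrix[0])
--     for column in range(num_cols):
--         is_isolated = True
--         isolated = []
--         for row in range(len(matrix)):
--             double_zero = matrix[row][column] == 0 and matrix[row][column] in isolated
--             non_isolated_value = matrix[row][column] != 0 and matrix[row][column] != -1
--             if double_zero or non_isolated_value:
--                 is_isolated = False
--                 break
--             isolated.append(matrix[row][column])
--         if is_isolated:
--             isolated_vertices.append(column)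
--
--     return isolated_vertices
-- ===== SOURCE B (Python) =====
-- def get_isolated_vertices(matrix):
--     num_cols = len(matrix[0])
--     ok = [True] * num_cols
--     zeros = [0] * num_cols
--     for row in matrix:
--         for c in range(num_cols):
--             v = row[c]
--             if v == 0:
--                 zeros[c] = zeros[c] + 1
--             elif v != -1:
--                 ok[c] = False
--     return [c for c in range(num_cols) if ok[c] and zeros[c] <= 1]
-- ===== Notes on version B (the rewrite author's own statement) =====
-- stated objective: alternative
-- what changed: A scans column by column (an inner row loop per column with an early break and a running 'isolated' membership list); B makes one row-major sweep over the matrix maintaining per-column accumulator arrays (an ok flag and a zero count per column) and emits the qualifying column indices at the end.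
-- outside the precondition, e.g. on get_isolated_vertices([[1], []]): A returns [], B raises IndexError
import Mathlib
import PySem

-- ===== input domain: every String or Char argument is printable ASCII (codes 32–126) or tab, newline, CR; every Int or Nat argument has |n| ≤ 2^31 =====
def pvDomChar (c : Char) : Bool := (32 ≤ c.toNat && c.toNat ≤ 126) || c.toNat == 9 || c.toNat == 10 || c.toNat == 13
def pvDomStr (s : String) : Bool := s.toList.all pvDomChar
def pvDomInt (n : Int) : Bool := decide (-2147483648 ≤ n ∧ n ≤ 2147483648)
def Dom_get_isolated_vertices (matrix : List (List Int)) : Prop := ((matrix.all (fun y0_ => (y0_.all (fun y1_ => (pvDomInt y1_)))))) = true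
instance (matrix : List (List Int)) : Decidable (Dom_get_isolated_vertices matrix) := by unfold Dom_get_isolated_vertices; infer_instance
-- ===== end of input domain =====

-- B replaces A's column-by-column scans (inner row loop with early break and a running
-- membership list) by one row-major sweep maintaining per-column accumulators; objective: alternative.

-- ===== PORT A =====
-- matrix[row][column]; both indices are in range under Pre_, so the default is never used there
def pvGet (matrix : List (List Int)) (row column : Int) : Int :=
  PySem.List.pyGetD (PySem.List.pyGetD matrix row []) column 0

-- A's inner 'for row in range(len(matrix))' loop with break, carrying the 'isolated' list
def pvAisolatedLoop (matrix : List (List Int)) (column : Int) : List Int → List Int → Bool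
  | [], _ => true
  | row :: rows, isolated =>
    let v := pvGet matrix row column
    let double_zero := v == 0 && isolated.contains v
    let non_isolated_value := v != 0 && v != -1
    if double_zero || non_isolated_value then false
    else pvAisolatedLoop matrix column rows (isolated ++ [v])

def get_isolated_vertices (matrix : List (List Int)) : List Int :=
  let num_cols : Int := (PySem.List.pyGetD matrix 0 []).length
  (PySem.List.pyRange 0 num_cols 1).foldl
    (fun isolated_vertices column =>
      if pvAisolatedLoop matrix column (PySem.List.pyRange 0 (matrix.length : Int) 1) [] then
        isolated_vertices ++ [column]
      else isolated_vertices) []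

-- ===== PORT B =====
-- the inner 'for c in range(num_cols)' loop of Source B: update the two accumulator arrays for one row
def pvRowStep (num_cols : Int) (st : List Bool × List Int) (row : List Int) : List Bool × List Int :=
  (PySem.List.pyRange 0 num_cols 1).foldl
    (fun st c =>
      let v := PySem.List.pyGetD row c 0
      if v == 0 then (st.1, PySem.List.pySetD st.2 c (PySem.List.pyGetD st.2 c 0 + 1))
      else if v != -1 then (PySem.List.pySetD st.1 c false, st.2)
      else st) st

def get_isolated_vertices_alt (matrix : List (List Int)) : List Int :=
  let num_cols : Int := (PySem.List.pyGetD matrix 0 []).length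
  let st := matrix.foldl (pvRowStep num_cols)
    (List.replicate num_cols.toNat true, List.replicate num_cols.toNat 0)
  (PySem.List.pyRange 0 num_cols 1).filter
    (fun c => PySem.List.pyGetD st.1 c false && decide (PySem.List.pyGetD st.2 c 0 ≤ 1))

-- ===== PRECONDITION & SPEC =====
-- Pre_ excludes the empty matrix (A raises IndexError at matrix[0]) and ragged matrices with a
-- row shorter than matrix[0] (row[c] raises IndexError in B, and matrix[row][column] in A unless
-- an earlier row of that column already broke the loop); B itself raises on all excluded inputs.
def Pre_get_isolated_vertices (matrix : List (List Int)) : Prop :=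
  matrix ≠ [] ∧ ∀ row ∈ matrix, (matrix.headD []).length ≤ row.length
instance (matrix : List (List Int)) : Decidable (Pre_get_isolated_vertices matrix) := by
  unfold Pre_get_isolated_vertices; infer_instance

def pvWitness_get_isolated_vertices : List (List Int) := [[0, -1, 1], [-1, 0, 0], [0, 0, -1]]

def Spec_get_isolated_vertices (matrix : List (List Int)) (out : List Int) : Prop := out = get_isolated_vertices_alt matrix
instance (matrix : List (List Int)) (out : List Int) : Decidable (Spec_get_isolated_vertices matrix out) := by unfold Spec_get_isolated_vertices; infer_instance

-- ===== CLAIM (what is proved, stated in full; the proofs are below) =====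
def Claim_equal_get_isolated_vertices : Prop := ∀ (matrix : List (List Int)), Dom_get_isolated_vertices matrix → Pre_get_isolated_vertices matrix → Spec_get_isolated_vertices matrix (get_isolated_vertices matrix)

-- ===== LEMMAS AND PROOFS =====

-- A's inner loop decides exactly: every value so far is 0 or -1, and the number of zeros seen
-- (including one credited to 'isolated' if it already holds a 0) is at most 1.
theorem pvAisolatedLoop_char (matrix : List (List Int)) (column : Int) :
    ∀ (rows : List Int) (isolated : List Int),
      pvAisolatedLoop matrix column rows isolated =
        (((rows.map (fun r => pvGet matrix r column)).all (fun v => v == 0 || v == -1)) &&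
         decide ((rows.map (fun r => pvGet matrix r column)).count 0 +
                 (if isolated.contains (0 : Int) then 1 else 0) ≤ 1)) := by
  intro rows
  induction rows with
  | nil =>
    intro isolated
    simp only [pvAisolatedLoop, List.map_nil, List.all_nil, List.count_nil]
    split <;> simp
  | cons row rows ih =>
    intro isolated
    simp only [pvAisolatedLoop, List.map_cons, List.all_cons, List.count_cons]
    by_cases h0 : pvGet matrix row column = 0
    · by_cases hc : (0 : Int) ∈ isolated
      · simp [h0, hc]
      · simp only [h0, ih]
        simp [hc]
        try omega
    · by_cases h1 : pvGet matrix row column = -1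
      · simp only [h1, ih]
        simp
      · simp [h0, h1]

-- proof-side name for B's inner column loop, parameterised by the start column
def pvInner (row : List Int) (N : Nat) (a : Nat) (st : List Bool × List Int) : List Bool × List Int :=
  (PySem.List.pyRange (a : Int) (N : Int) 1).foldl
    (fun st c =>
      let v := PySem.List.pyGetD row c 0
      if v == 0 then (st.1, PySem.List.pySetD st.2 c (PySem.List.pyGetD st.2 c 0 + 1))
      else if v != -1 then (PySem.List.pySetD st.1 c false, st.2)
      else st) st

theorem pvInner_cons (row : List Int) (N a : Nat) (st : List Bool × List Int) (h : a < N) :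
    pvInner row N a st =
      pvInner row N (a + 1)
        (let v := row.getD a 0
         if v == 0 then (st.1, st.2.set a (st.2.getD a 0 + 1))
         else if v != -1 then (st.1.set a false, st.2)
         else st) := by
  unfold pvInner
  rw [PySem.List.pyRange_one_cons (by exact_mod_cast h), List.foldl_cons]
  rw [show ((a : Int) + 1) = ((a + 1 : Nat) : Int) by push_cast; ring]
  simp [PySem.List.pyGetD_natCast, PySem.List.pySetD_natCast]

-- one pass of B's inner column loop, starting at column a: pointwise effect on the accumulators
theorem pvRowStepAux (row : List Int) (N : Nat) :
    ∀ (k a : Nat), a + k = N → ∀ (ok : List Bool) (zeros : List Int),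
      ok.length = N → zeros.length = N →
      (pvInner row N a (ok, zeros)).1.length = N ∧
      (pvInner row N a (ok, zeros)).2.length = N ∧
      ∀ m : Nat, m < N →
        (pvInner row N a (ok, zeros)).1.getD m false =
          (if a ≤ m then ok.getD m false && (row.getD m 0 == 0 || row.getD m 0 == -1)
           else ok.getD m false) ∧
        (pvInner row N a (ok, zeros)).2.getD m 0 =
          zeros.getD m 0 + (if a ≤ m ∧ row.getD m 0 = 0 then 1 else 0) := by
  intro k
  induction k with
  | zero =>
    intro a ha ok zeros hok hz
    have hle : (N : Int) ≤ (a : Int) := by exact_mod_cast (by omega : N ≤ a)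
    unfold pvInner
    rw [PySem.List.pyRange_one_eq_nil hle]
    refine ⟨hok, hz, ?_⟩
    intro m hm
    have : ¬ a ≤ m := by omega
    simp [this]
  | succ k ih =>
    intro a ha ok zeros hok hz
    rw [pvInner_cons row N a _ (by omega)]
    by_cases h0 : row.getD a 0 = 0
    · have h0n : row[a]?.getD 0 = (0 : Int) := by
        rw [← List.getD_eq_getElem?_getD]; exact h0
      rw [if_pos (show (row.getD a 0 == 0) = true by simp [h0n])]
      have H := ih (a + 1) (by omega) ok (zeros.set a (zeros.getD a 0 + 1)) hok (by simp [hz])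
      refine ⟨H.1, H.2.1, ?_⟩
      intro m hm
      obtain ⟨e1, e2⟩ := H.2.2 m hm
      constructor
      · rw [e1]
        by_cases hma : a + 1 ≤ m
        · simp [hma, (by omega : a ≤ m)]
        · rcases (by omega : ¬ a ≤ m ∨ m = a) with h | h
          · simp [hma, h]
          · subst h
            simp [hma, h0n]
      · rw [e2]
        by_cases hma : a + 1 ≤ m
        · rw [List.getD_eq_getElem?_getD, List.getElem?_set_ne (by omega)]
          simp [hma, (by omega : a ≤ m), ← List.getD_eq_getElem?_getD]
        · rcases (by omega : ¬ a ≤ m ∨ m = a) with h | h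
          · rw [List.getD_eq_getElem?_getD, List.getElem?_set_ne (by omega)]
            simp [hma, h, ← List.getD_eq_getElem?_getD]
          · subst h
            rw [List.getD_eq_getElem?_getD, List.getElem?_set_self (by omega)]
            simp [hma, h0n]
    · by_cases h1 : row.getD a 0 = -1
      · have h1n : row[a]?.getD 0 = (-1 : Int) := by
          rw [← List.getD_eq_getElem?_getD]; exact h1
        have h0n : ¬ (row[a]?.getD 0 = (0 : Int)) := by
          rw [← List.getD_eq_getElem?_getD]; exact h0
        rw [if_neg (show ¬ ((row.getD a 0 == 0) = true) by simp [h0n]),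
            if_neg (show ¬ ((row.getD a 0 != -1) = true) by simp [h1n])]
        have H := ih (a + 1) (by omega) ok zeros hok hz
        refine ⟨H.1, H.2.1, ?_⟩
        intro m hm
        obtain ⟨e1, e2⟩ := H.2.2 m hm
        constructor
        · rw [e1]
          by_cases hma : a + 1 ≤ m
          · simp [hma, (by omega : a ≤ m)]
          · rcases (by omega : ¬ a ≤ m ∨ m = a) with h | h
            · simp [hma, h]
            · subst h
              simp [hma, h1n]
        · rw [e2]
          by_cases hma : a + 1 ≤ m
          · simp [hma, (by omega : a ≤ m)]
          · rcases (by omega : ¬ a ≤ m ∨ m = a) with h | h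
            · simp [hma, h]
            · subst h
              simp [hma, h1n]
      · have h0n : ¬ (row[a]?.getD 0 = (0 : Int)) := by
          rw [← List.getD_eq_getElem?_getD]; exact h0
        have h1n : ¬ (row[a]?.getD 0 = (-1 : Int)) := by
          rw [← List.getD_eq_getElem?_getD]; exact h1
        rw [if_neg (show ¬ ((row.getD a 0 == 0) = true) by simp [h0n]),
            if_pos (show (row.getD a 0 != -1) = true by simp [h1n])]
        have H := ih (a + 1) (by omega) (ok.set a false) zeros (by simp [hok]) hz
        refine ⟨H.1, H.2.1, ?_⟩
        intro m hm
        obtain ⟨e1, e2⟩ := H.2.2 m hm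
        constructor
        · rw [e1]
          by_cases hma : a + 1 ≤ m
          · rw [List.getD_eq_getElem?_getD, List.getElem?_set_ne (by omega)]
            simp [hma, (by omega : a ≤ m), ← List.getD_eq_getElem?_getD]
          · rcases (by omega : ¬ a ≤ m ∨ m = a) with h | h
            · rw [List.getD_eq_getElem?_getD, List.getElem?_set_ne (by omega)]
              simp [hma, h, ← List.getD_eq_getElem?_getD]
            · subst h
              rw [List.getD_eq_getElem?_getD, List.getElem?_set_self (by omega)]
              simp [hma, h0n, h1n]
        · rw [e2]
          by_cases hma : a + 1 ≤ m
          · simp [hma, (by omega : a ≤ m)]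
          · rcases (by omega : ¬ a ≤ m ∨ m = a) with h | h
            · simp [hma, h]
            · subst h
              simp [hma, h0n]

-- B's outer row sweep: the accumulators hold, per column, the all-0/-1 flag and the zero count
theorem pvFoldRows (N : Nat) :
    ∀ (rows : List (List Int)) (ok : List Bool) (zeros : List Int),
      ok.length = N → zeros.length = N →
      (rows.foldl (pvRowStep (N : Int)) (ok, zeros)).1.length = N ∧
      (rows.foldl (pvRowStep (N : Int)) (ok, zeros)).2.length = N ∧
      ∀ m : Nat, m < N →
        (rows.foldl (pvRowStep (N : Int)) (ok, zeros)).1.getD m false =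
          (ok.getD m false && (rows.map (fun r => r.getD m 0)).all (fun v => v == 0 || v == -1)) ∧
        (rows.foldl (pvRowStep (N : Int)) (ok, zeros)).2.getD m 0 =
          zeros.getD m 0 + (rows.map (fun r => r.getD m 0)).count 0 := by
  intro rows
  induction rows with
  | nil =>
    intro ok zeros hok hz
    refine ⟨hok, hz, ?_⟩
    intro m hm
    simp
  | cons row rows ih =>
    intro ok zeros hok hz
    have hst : pvRowStep (N : Int) (ok, zeros) row = pvInner row N 0 (ok, zeros) := by
      unfold pvRowStep pvInner
      norm_num
    simp only [List.foldl_cons, hst]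
    have hstep := pvRowStepAux row N N 0 (by omega) ok zeros hok hz
    rcases hstep with ⟨hl1, hl2, hpt⟩
    have hpair : pvInner row N 0 (ok, zeros) =
        ((pvInner row N 0 (ok, zeros)).1, (pvInner row N 0 (ok, zeros)).2) := rfl
    rw [hpair]
    have H := ih _ _ hl1 hl2
    refine ⟨H.1, H.2.1, ?_⟩
    intro m hm
    obtain ⟨e1, e2⟩ := H.2.2 m hm
    obtain ⟨p1, p2⟩ := hpt m hm
    constructor
    · rw [e1, p1]
      simp [Bool.and_assoc]
    · rw [e2, p2]
      simp only [List.map_cons, List.count_cons, List.getD_eq_getElem?_getD]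
      by_cases h0 : row[m]?.getD (0 : Int) = 0
      · simp [h0]
        omega
      · simp [h0]

-- the column values A reads, as a map over the rows
theorem pvColA_eq (matrix : List (List Int)) (k : Nat) :
    (PySem.List.pyRange 0 (matrix.length : Int) 1).map (fun r => pvGet matrix r (k : Int)) =
      matrix.map (fun row => row.getD k 0) := by
  have h1 : (fun r => pvGet matrix r (k : Int)) =
      (fun row => PySem.List.pyGetD row (k : Int) 0) ∘ (fun r => PySem.List.pyGetD matrix r []) := rfl
  rw [h1, ← List.map_map, PySem.List.map_pyGetD_pyRange_zero']
  simp [PySem.List.pyGetD_natCast]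

theorem get_isolated_vertices_spec : Claim_equal_get_isolated_vertices := by
  intro matrix _ _
  unfold Spec_get_isolated_vertices get_isolated_vertices get_isolated_vertices_alt
  rw [PySem.List.foldl_append_if_eq_filter]
  simp only [List.nil_append, Int.toNat_natCast]
  have hfold := pvFoldRows (PySem.List.pyGetD matrix 0 []).length matrix
    (List.replicate (PySem.List.pyGetD matrix 0 []).length true)
    (List.replicate (PySem.List.pyGetD matrix 0 []).length 0) (by simp) (by simp)
  apply List.filter_congr
  intro c hc
  have hc' := (PySem.List.mem_pyRange_one).mp hc
  rw [show c = ((c.toNat : Nat) : Int) from by omega]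
  rw [pvAisolatedLoop_char, pvColA_eq]
  obtain ⟨e1, e2⟩ := hfold.2.2 c.toNat (by omega)
  simp only [PySem.List.pyGetD_natCast]
  rw [e1, e2]
  simp only [List.getD_eq_getElem?_getD, List.getElem?_replicate]
  simp [show c.toNat < (PySem.List.pyGetD matrix 0 []).length from by omega]
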